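-- pv_equiv track=rewrite | github.com/sensein/sails-vlm | models/cosmos.py | _extract_label
-- ===== SOURCE A (Python) =====
-- from typing import Any, Dict, List, Optional, Sequence, Tuple, Union, cast
--
-- def _extract_label(
--
--     text: str,
--     labels: Sequence[str],
--     aliases: Optional[Dict[str, List[str]]] = None,
-- ) -> Optional[str]:
--     low = (text or "").lower()
--     labels_sorted = sorted([str(lab) for lab in labels], key=len, reverse=True)
--     for label in labels_sorted:
--         if label.lower() in low:
--             return label
--     if aliases:
--         for canonical, syns in aliases.items():
--             for syn in syns:
--                 if syn.lower() in low:
--                     return canonical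
--     return None
-- ===== SOURCE B (Python) =====
-- from typing import Dict, List, Optional, Sequence
--
--
-- def _extract_label(
--     text: str,
--     labels: Sequence[str],
--     aliases: Optional[Dict[str, List[str]]] = None,
-- ) -> Optional[str]:
--     low = text.lower()
--     # single pass: keep the longest matching label; '>' keeps the earliest on ties,
--     # exactly the stable reverse-length sort order A scans.
--     best = None
--     for lab in labels:
--         s = str(lab)
--         if (best is None or len(s) > len(best)) and s.lower() in low:
--             best = s
--     if best is not None:
--         return best
--     for canonical, syns in (aliases or {}).items():
--         if any(syn.lower() in low for syn in syns):
--             return canonical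
--     return None
-- ===== Notes on version B (the rewrite author's own statement) =====
-- stated objective: alternative
-- what changed: B drops the length-sort entirely and finds the result in one pruned pass over labels, keeping the longest matching label (earliest on ties, matching the stable sort A scans), and replaces the explicit nested alias loops with (aliases or {}) plus any().
import Mathlib
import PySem

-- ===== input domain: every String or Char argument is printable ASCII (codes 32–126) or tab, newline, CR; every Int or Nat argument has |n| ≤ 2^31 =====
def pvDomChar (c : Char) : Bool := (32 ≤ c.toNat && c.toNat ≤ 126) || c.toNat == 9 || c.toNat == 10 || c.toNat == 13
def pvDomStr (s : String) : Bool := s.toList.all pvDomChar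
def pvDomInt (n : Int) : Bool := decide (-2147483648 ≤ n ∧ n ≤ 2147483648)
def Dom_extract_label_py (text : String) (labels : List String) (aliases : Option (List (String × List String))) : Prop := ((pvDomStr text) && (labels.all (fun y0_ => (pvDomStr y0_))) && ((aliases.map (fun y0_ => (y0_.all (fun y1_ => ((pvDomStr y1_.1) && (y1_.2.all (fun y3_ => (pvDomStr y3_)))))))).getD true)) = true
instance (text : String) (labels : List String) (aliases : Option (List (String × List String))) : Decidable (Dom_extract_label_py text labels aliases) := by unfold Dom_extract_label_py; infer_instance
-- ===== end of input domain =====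

-- B drops A's length-sort and finds the longest matching label (earliest on ties) in one pass;
-- alternative decomposition, same asymptotic substring-scan cost.


-- ===== PORT A =====
-- for label in labels_sorted: if label.lower() in low: return label
def pyA_labelLoop (low : String) : List String → Option String
  | [] => none
  | l :: rest =>
    if PySem.Str.isIn (PySem.Str.lower l) low then some l else pyA_labelLoop low rest

-- for syn in syns: if syn.lower() in low: return canonical
def pyA_synLoop (low canonical : String) : List String → Option String
  | [] => none
  | syn :: rest =>
    if PySem.Str.isIn (PySem.Str.lower syn) low then some canonical
    else pyA_synLoop low canonical rest

-- for canonical, syns in aliases.items(): …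
def pyA_aliasLoop (low : String) : List (String × List String) → Option String
  | [] => none
  | (canonical, syns) :: rest =>
    match pyA_synLoop low canonical syns with
    | some r => some r
    | none => pyA_aliasLoop low rest

def extract_label_py (text : String) (labels : List String) (aliases : Option (List (String × List String))) : Option String :=
  let low := PySem.Str.lower (if text == "" then "" else text)   -- (text or "").lower()
  let labels_sorted := PySem.List.sorted (labels.map (fun lab => lab)) PySem.Str.len true
  match pyA_labelLoop low labels_sorted with
  | some l => some l
  | none =>
    match aliases with
    | some d => if d.isEmpty then none else pyA_aliasLoop low d   -- 'if aliases:'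
    | none => none

-- ===== PORT B =====
-- one pass keeping the longest matching label (earliest on ties)
def pyB_best (low : String) (labels : List String) : Option String :=
  labels.foldl
    (fun best s =>
      if (match best with
          | none => true
          | some b => decide (PySem.Str.len b < PySem.Str.len s)) &&
         PySem.Str.isIn (PySem.Str.lower s) low
      then some s else best)
    none

def extract_label_py_alt (text : String) (labels : List String) (aliases : Option (List (String × List String))) : Option String :=
  let low := PySem.Str.lower text
  match pyB_best low labels with
  | some b => some b
  | none =>
    ((aliases.getD []).findSome? (fun p =>
      if p.2.any (fun syn => PySem.Str.isIn (PySem.Str.lower syn) low) then some p.1 else none))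

-- ===== PRECONDITION & SPEC =====
def Spec_extract_label_py (text : String) (labels : List String) (aliases : Option (List (String × List String))) (out : Option String) : Prop := out = extract_label_py_alt text labels aliases
instance (text : String) (labels : List String) (aliases : Option (List (String × List String))) (out : Option String) : Decidable (Spec_extract_label_py text labels aliases out) := by unfold Spec_extract_label_py; infer_instance

-- ===== CLAIM (what is proved, stated in full; the proofs are below) =====
def Claim_equal_extract_label_py : Prop := ∀ (text : String) (labels : List String) (aliases : Option (List (String × List String))), Dom_extract_label_py text labels aliases → Spec_extract_label_py text labels aliases (extract_label_py text labels aliases)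

-- ===== LEMMAS AND PROOFS =====

-- A's first-match loop is List.find?
theorem pyA_labelLoop_eq_find? (low : String) (ls : List String) :
    pyA_labelLoop low ls = ls.find? (fun s => PySem.Str.isIn (PySem.Str.lower s) low) := by
  induction ls with
  | nil => rfl
  | cons l rest ih => simp [pyA_labelLoop, List.find?, ih]; split <;> simp_all

-- inserting x into a length-descending list commutes with first-match as B's fold step does
theorem find?_insertBy (low : String) (x : String) (l : List String)
    (hl : l.Pairwise (fun a b => PySem.Str.len b ≤ PySem.Str.len a)) :
    (PySem.List.insertBy (fun a b => decide (PySem.Str.len b < PySem.Str.len a)) x l).find?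
        (fun s => PySem.Str.isIn (PySem.Str.lower s) low) =
      (match l.find? (fun s => PySem.Str.isIn (PySem.Str.lower s) low) with
       | none => if PySem.Str.isIn (PySem.Str.lower x) low then some x else none
       | some y =>
         if decide (PySem.Str.len y < PySem.Str.len x) && PySem.Str.isIn (PySem.Str.lower x) low
         then some x else some y) := by
  induction l with
  | nil =>
    simp only [PySem.List.insertBy, List.find?]
    rcases Bool.eq_false_or_eq_true (PySem.Str.isIn (PySem.Str.lower x) low) with h | h <;>
      simp only [h] <;> rfl
  | cons y ys ih =>
    rw [List.pairwise_cons] at hl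
    simp only [PySem.List.insertBy]
    by_cases hxy : PySem.Str.len y < PySem.Str.len x
    · simp only [hxy, decide_true, if_true]
      by_cases hpx : PySem.Str.isIn (PySem.Str.lower x) low = true
      · rw [List.find?_cons_of_pos (p := fun s => PySem.Str.isIn (PySem.Str.lower s) low) hpx]
        by_cases hpy : PySem.Str.isIn (PySem.Str.lower y) low = true
        · rw [List.find?_cons_of_pos (p := fun s => PySem.Str.isIn (PySem.Str.lower s) low) hpy, hpx]
          show some x = if _ then some x else some y
          rw [decide_eq_true hxy, Bool.true_and]
          rfl
        · rw [List.find?_cons_of_neg (p := fun s => PySem.Str.isIn (PySem.Str.lower s) low) hpy]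
          cases hfy : List.find? (fun s => PySem.Str.isIn (PySem.Str.lower s) low) ys with
          | none => simp only [hpx]; rfl
          | some z =>
            have hz : PySem.Str.len z < PySem.Str.len x :=
              lt_of_le_of_lt (hl.1 z (List.mem_of_find?_eq_some hfy)) hxy
            show some x = if _ then some x else some z
            rw [hpx, decide_eq_true hz, Bool.true_and]
            rfl
      · rw [List.find?_cons_of_neg (p := fun s => PySem.Str.isIn (PySem.Str.lower s) low) hpx]
        by_cases hpy : PySem.Str.isIn (PySem.Str.lower y) low = true
        · rw [List.find?_cons_of_pos (p := fun s => PySem.Str.isIn (PySem.Str.lower s) low) hpy]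
          have : PySem.Str.isIn (PySem.Str.lower x) low = false := by
            exact Bool.not_eq_true _ ▸ Bool.eq_false_iff.mpr (fun h => hpx h)
          rw [this]
          simp only [Bool.and_false]
          rfl
        · rw [List.find?_cons_of_neg (p := fun s => PySem.Str.isIn (PySem.Str.lower s) low) hpy]
          have hfx : PySem.Str.isIn (PySem.Str.lower x) low = false :=
            Bool.eq_false_iff.mpr (fun h => hpx h)
          cases hfy : List.find? (fun s => PySem.Str.isIn (PySem.Str.lower s) low) ys with
          | none => simp only [hfx]; rfl
          | some z => simp only [hfx, Bool.and_false]; rfl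
    · have hxy' : (decide (PySem.Str.len y < PySem.Str.len x)) = false := decide_eq_false hxy
      simp only [hxy', Bool.false_eq_true, if_false]
      by_cases hpy : PySem.Str.isIn (PySem.Str.lower y) low = true
      · rw [List.find?_cons_of_pos (p := fun s => PySem.Str.isIn (PySem.Str.lower s) low) hpy]
        rw [List.find?_cons_of_pos (p := fun s => PySem.Str.isIn (PySem.Str.lower s) low) hpy]
        show some y = if _ then some x else some y
        rw [hxy', Bool.false_and]
        rfl
      · rw [List.find?_cons_of_neg (p := fun s => PySem.Str.isIn (PySem.Str.lower s) low) hpy]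
        rw [List.find?_cons_of_neg (p := fun s => PySem.Str.isIn (PySem.Str.lower s) low) hpy]
        exact ih hl.2

-- first match over the reverse-length sorted list = B's single-pass longest-match fold
theorem find?_sorted_eq_fold (low : String) (xs : List String) :
    (PySem.List.sorted xs PySem.Str.len true).find?
        (fun s => PySem.Str.isIn (PySem.Str.lower s) low) = pyB_best low xs := by
  rw [PySem.List.sorted_rev_eq_foldl_insertBy]
  unfold pyB_best
  induction xs using List.reverseRecOn with
  | nil => rfl
  | append_singleton ys x ih =>
    rw [List.foldl_append, List.foldl_append]
    simp only [List.foldl]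
    rw [← PySem.List.sorted_rev_eq_foldl_insertBy,
        find?_insertBy low x _ (PySem.List.sorted_pairwise_rev ys PySem.Str.len),
        PySem.List.sorted_rev_eq_foldl_insertBy, ih]
    cases (List.foldl _ (none : Option String) ys) with
    | none => simp
    | some b => cases PySem.Str.isIn (PySem.Str.lower x) low <;> simp

-- A's inner synonym loop as a single any() test
theorem pyA_synLoop_eq_any (low canonical : String) (syns : List String) :
    pyA_synLoop low canonical syns =
      (if syns.any (fun syn => PySem.Str.isIn (PySem.Str.lower syn) low) then some canonical
       else none) := by
  induction syns with
  | nil => rfl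
  | cons s rest ih =>
    simp only [pyA_synLoop, List.any_cons, ih]
    rcases Bool.eq_false_or_eq_true (PySem.Str.isIn (PySem.Str.lower s) low) with h | h <;>
      simp only [h, Bool.false_or, Bool.true_or] <;> rfl

-- A's nested alias loops = B's findSome?
theorem pyA_aliasLoop_eq_findSome? (low : String) (d : List (String × List String)) :
    pyA_aliasLoop low d =
      d.findSome? (fun p =>
        if p.2.any (fun syn => PySem.Str.isIn (PySem.Str.lower syn) low) then some p.1
        else none) := by
  induction d with
  | nil => rfl
  | cons p rest ih =>
    obtain ⟨c, syns⟩ := p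
    simp only [pyA_aliasLoop, pyA_synLoop_eq_any, List.findSome?_cons, ih]
    rcases Bool.eq_false_or_eq_true (syns.any (fun syn => PySem.Str.isIn (PySem.Str.lower syn) low)) with h | h <;>
      simp only [h] <;> rfl

-- ===== VERDICT (by name: the statement is the Claim_ definition above) =====
theorem extract_label_py_spec : Claim_equal_extract_label_py := by
  intro text labels aliases _
  unfold Spec_extract_label_py extract_label_py extract_label_py_alt
  have htext : (if text == "" then "" else text) = text := by
    by_cases h : text = "" <;> simp [h]
  simp only [htext, List.map_id', pyA_labelLoop_eq_find?, find?_sorted_eq_fold,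
    pyA_aliasLoop_eq_findSome?]
  cases pyB_best (PySem.Str.lower text) labels with
  | some b => rfl
  | none =>
    cases aliases with
    | none => rfl
    | some d => cases d <;> rfl
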